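-- pv_equiv track=rewrite | github.com/ahadaplanand/Learning-Python | 20-Рекурсия+PIN/01.py | female
-- ===== SOURCE A (Python) =====
-- def female(n):
--     if n < 0:
--         return -1
--     else:
--         var = 0
--         if n == 0:
--             var = 1
--         else:
--             var = n - male(female(n - 1))
--         return var
--
-- def male(n):
--     if n < 0:
--         return -1
--     else:
--         var = 0
--         if n == 0:
--             var == 0
--         else:
--             var = n - female(male(n - 1))
--         return var
-- ===== SOURCE B (Python) =====
-- def female(n):
--     if n < 0:
--         return -1
--     f = [1]
--     m = [0]
--     for i in range(1, n + 1):
--         m.append(i - f[m[i - 1]])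
--         f.append(i - m[f[i - 1]])
--     return f[n]
-- ===== Notes on version B (the rewrite author's own statement) =====
-- stated objective: faster
-- what changed: Replaced the exponential mutual recursion female/male by a single bottom-up loop that fills two DP tables f and m up to index n and reads f[n].
-- outside the precondition, e.g. on female(997): A does not finish within the time limit, B returns 616; on female(1000): A does not finish within the time limit, B returns 618
import Mathlib
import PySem

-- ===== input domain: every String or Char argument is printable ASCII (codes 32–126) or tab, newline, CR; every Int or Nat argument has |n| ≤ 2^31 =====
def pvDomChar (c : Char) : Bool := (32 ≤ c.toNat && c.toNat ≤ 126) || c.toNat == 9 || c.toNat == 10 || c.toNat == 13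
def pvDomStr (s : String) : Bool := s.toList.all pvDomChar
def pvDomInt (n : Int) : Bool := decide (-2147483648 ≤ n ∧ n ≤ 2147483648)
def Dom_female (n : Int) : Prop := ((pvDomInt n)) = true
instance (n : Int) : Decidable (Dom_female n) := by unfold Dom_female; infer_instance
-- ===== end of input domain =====

-- B replaces A's exponential mutual recursion by a bottom-up DP over two growing tables (faster, asymptotically).

-- ===== PORT A =====
-- A is the mutual recursion female/male; the Nat fuel is only a totality guard
-- (2*n.toNat+2 is proved sufficient below in fuel_eq), the branch structure is A's.
mutual
def femaleFuel : Nat → Int → Int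
  | 0, _ => 0
  | fuel + 1, n =>
    if n < 0 then -1
    else if n = 0 then 1
    else n - maleFuel fuel (femaleFuel fuel (n - 1))
def maleFuel : Nat → Int → Int
  | 0, _ => 0
  | fuel + 1, n =>
    if n < 0 then -1
    else if n = 0 then 0   -- A's `var == 0` is a no-op comparison; var stays 0
    else n - femaleFuel fuel (maleFuel fuel (n - 1))
end

def female (n : Int) : Int := femaleFuel (2 * n.toNat + 2) n

-- ===== PORT B =====
-- one loop iteration of Source B: append m[i], then f[i]
def femaleStep (fm : List Int × List Int) (i : Int) : List Int × List Int :=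
  let f := fm.1
  let m := fm.2
  let m' := m ++ [i - PySem.List.pyGetD f (PySem.List.pyGetD m (i - 1) 0) 0]
  let f' := f ++ [i - PySem.List.pyGetD m' (PySem.List.pyGetD f (i - 1) 0) 0]
  (f', m')

def female_alt (n : Int) : Int :=
  if n < 0 then -1
  else
    let fm := (PySem.List.pyRange 1 (n + 1) 1).foldl femaleStep ([1], [0])
    PySem.List.pyGetD fm.1 n 0

-- ===== PRECONDITION & SPEC =====
-- Pre_ excludes exactly n >= 997, on which A never returns normally: the recursive descent
-- female(n) -> female(n-1) -> ... exceeds CPython's default recursion limit of 1000 (RecursionError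
-- at a top-level call with n = 997), and with a raised limit A's exponential recursion does not finish.
def Pre_female (n : Int) : Prop := n ≤ 996
instance (n : Int) : Decidable (Pre_female n) := by unfold Pre_female; infer_instance
def pvWitness_female : Int := 5

def Spec_female (n : Int) (out : Int) : Prop := out = female_alt n
instance (n : Int) (out : Int) : Decidable (Spec_female n out) := by unfold Spec_female; infer_instance

-- ===== CLAIM (what is proved, stated in full; the proofs are below) =====
def Claim_equal_female : Prop := ∀ (n : Int), Dom_female n → Pre_female n → Spec_female n (female n)

-- ===== LEMMAS AND PROOFS =====

-- the state of B's two tables after k loop iterations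
def FM : Nat → List Int × List Int
  | 0 => ([1], [0])
  | k + 1 => femaleStep (FM k) ((k : Int) + 1)

-- the table entries (the Hofstadter F and M values)
def Fh (k : Nat) : Nat := ((FM k).1.getD k 0).toNat
def Mh (k : Nat) : Nat := ((FM k).2.getD k 0).toNat

-- invariant of B's loop: the tables list F/M in order, with bounds and the recurrences
def LoopInv (k : Nat) : Prop :=
  (FM k).1 = (List.range (k + 1)).map (fun j => (Fh j : Int)) ∧
  (FM k).2 = (List.range (k + 1)).map (fun j => (Mh j : Int)) ∧
  (∀ j, j ≤ k → Fh j ≤ j + 1 ∧ Mh j ≤ j) ∧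
  (∀ j, j < k → (Fh (j + 1) : Int) = (j + 1 : Int) - (Mh (Fh j) : Int) ∧
                (Mh (j + 1) : Int) = (j + 1 : Int) - (Fh (Mh j) : Int))

theorem getD_last (l : List Int) (x : Int) : (l ++ [x]).getD l.length 0 = x := by
  simp [List.getD_eq_getElem?_getD]

theorem inv_all (k : Nat) : LoopInv k := by
  induction k with
  | zero =>
    refine ⟨by decide, by decide, ?_, by omega⟩
    intro j hj; interval_cases j; decide
  | succ k ih =>
    obtain ⟨hf, hm, hb, hr⟩ := ih
    have hMk : Mh k ≤ k := (hb k le_rfl).2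
    have hFMk : Fh (Mh k) ≤ k + 1 := le_trans (hb (Mh k) hMk).1 (by omega)
    have hFk : Fh k ≤ k + 1 := (hb k le_rfl).1
    have hlenf : (FM k).1.length = k + 1 := by rw [hf]; simp
    have hlenm : (FM k).2.length = k + 1 := by rw [hm]; simp
    have A1 : PySem.List.pyGetD (FM k).2 ((k : Int) + 1 - 1) 0 = (Mh k : Int) := by
      have h : (k : Int) + 1 - 1 = ((k : Nat) : Int) := by ring
      rw [h, PySem.List.pyGetD_natCast, hm, PySem.List.getD_map_range _ _ _ _ (by omega)]
    have A2 : PySem.List.pyGetD (FM k).1 ((Mh k : Int)) 0 = (Fh (Mh k) : Int) := by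
      rw [PySem.List.pyGetD_natCast, hf, PySem.List.getD_map_range _ _ _ _ (by omega)]
    have hm' : (FM (k + 1)).2 = (FM k).2 ++ [(k : Int) + 1 - (Fh (Mh k) : Int)] := by
      show (femaleStep (FM k) ((k : Int) + 1)).2 = _
      simp only [femaleStep]
      rw [A1, A2]
    have hMh1 : (Mh (k + 1) : Int) = (k : Int) + 1 - (Fh (Mh k) : Int) := by
      have hg : (FM (k + 1)).2.getD (k + 1) 0 = (k : Int) + 1 - (Fh (Mh k) : Int) := by
        rw [hm', show k + 1 = (FM k).2.length from hlenm.symm, getD_last]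
      rw [Mh, hg, Int.toNat_of_nonneg (by omega)]
    have hm'' : (FM (k + 1)).2 = (List.range (k + 2)).map (fun j => (Mh j : Int)) := by
      rw [List.range_succ, List.map_append, ← hm, List.map_singleton, hm', hMh1]
    have A3 : PySem.List.pyGetD (FM k).1 ((k : Int) + 1 - 1) 0 = (Fh k : Int) := by
      have h : (k : Int) + 1 - 1 = ((k : Nat) : Int) := by ring
      rw [h, PySem.List.pyGetD_natCast, hf, PySem.List.getD_map_range _ _ _ _ (by omega)]
    have A4 : PySem.List.pyGetD (FM (k + 1)).2 ((Fh k : Int)) 0 = (Mh (Fh k) : Int) := by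
      rw [PySem.List.pyGetD_natCast, hm'', PySem.List.getD_map_range _ _ _ _ (by omega)]
    have hMFk : Mh (Fh k) ≤ k + 1 := by
      rcases Nat.lt_or_ge (Fh k) (k + 1) with h | h
      · exact le_trans (hb (Fh k) (by omega)).2 (by omega)
      · have hFkEq : Fh k = k + 1 := by omega
        rw [hFkEq]; omega
    have hf' : (FM (k + 1)).1 = (FM k).1 ++ [(k : Int) + 1 - (Mh (Fh k) : Int)] := by
      have h2 : (FM (k + 1)).2 = (FM k).2 ++
          [(k : Int) + 1 - PySem.List.pyGetD (FM k).1
            (PySem.List.pyGetD (FM k).2 ((k : Int) + 1 - 1) 0) 0] := by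
        show (femaleStep (FM k) ((k : Int) + 1)).2 = _
        simp only [femaleStep]
      show (femaleStep (FM k) ((k : Int) + 1)).1 = _
      simp only [femaleStep]
      rw [← h2, A3, A4]
    have hFh1 : (Fh (k + 1) : Int) = (k : Int) + 1 - (Mh (Fh k) : Int) := by
      have hg : (FM (k + 1)).1.getD (k + 1) 0 = (k : Int) + 1 - (Mh (Fh k) : Int) := by
        rw [hf', show k + 1 = (FM k).1.length from hlenf.symm, getD_last]
      rw [Fh, hg, Int.toNat_of_nonneg (by omega)]
    have hf'' : (FM (k + 1)).1 = (List.range (k + 2)).map (fun j => (Fh j : Int)) := by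
      rw [List.range_succ, List.map_append, ← hf, List.map_singleton, hf', hFh1]
    refine ⟨hf'', hm'', ?_, ?_⟩
    · intro j hj
      rcases Nat.lt_or_ge j (k + 1) with h | h
      · exact hb j (by omega)
      · have hj' : j = k + 1 := by omega
        subst hj'
        omega
    · intro j hj
      rcases Nat.lt_or_ge j k with h | h
      · exact hr j h
      · have hj' : j = k := by omega
        subst hj'
        exact ⟨by omega, by omega⟩

theorem fuel_eq (k : Nat) :
    (∀ fuel, 2 * k ≤ fuel → 1 ≤ fuel → maleFuel fuel (k : Int) = (Mh k : Int)) ∧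
    (∀ fuel, 2 * k + 1 ≤ fuel → femaleFuel fuel (k : Int) = (Fh k : Int)) := by
  induction k using Nat.strong_induction_on with
  | _ k ih =>
    match k with
    | 0 =>
      constructor
      · intro fuel _ h1
        obtain ⟨f, rfl⟩ : ∃ f, fuel = f + 1 := ⟨fuel - 1, by omega⟩
        simp [maleFuel, Mh, FM]
      · intro fuel h
        obtain ⟨f, rfl⟩ : ∃ f, fuel = f + 1 := ⟨fuel - 1, by omega⟩
        simp [femaleFuel, Fh, FM]
    | k + 1 =>
      obtain ⟨_, _, hb, hr⟩ := inv_all (k + 1)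
      have hrk := hr k (by omega)
      have hMk : Mh k ≤ k := (hb k (by omega)).2
      have hFk : Fh k ≤ k + 1 := (hb k (by omega)).1
      have hmale : ∀ fuel, 2 * (k + 1) ≤ fuel → maleFuel fuel (((k + 1 : Nat) : Int)) = (Mh (k + 1) : Int) := by
        intro fuel hfl
        obtain ⟨f, rfl⟩ : ∃ f, fuel = f + 1 := ⟨fuel - 1, by omega⟩
        have e1 : maleFuel f (((k + 1 : Nat) : Int) - 1) = (Mh k : Int) := by
          have h : ((k + 1 : Nat) : Int) - 1 = ((k : Nat) : Int) := by push_cast; ring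
          rw [h]; exact (ih k (by omega)).1 f (by omega) (by omega)
        have e2 : femaleFuel f ((Mh k : Int)) = (Fh (Mh k) : Int) :=
          (ih (Mh k) (by omega)).2 f (by omega)
        simp only [maleFuel]
        rw [if_neg (by push_cast; omega), if_neg (by push_cast; omega), e1, e2]
        push_cast at hrk ⊢
        omega
      refine ⟨fun fuel hfl _ => hmale fuel hfl, ?_⟩
      intro fuel hfl
      obtain ⟨f, rfl⟩ : ∃ f, fuel = f + 1 := ⟨fuel - 1, by omega⟩
      have e3 : femaleFuel f (((k + 1 : Nat) : Int) - 1) = (Fh k : Int) := by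
        have h : ((k + 1 : Nat) : Int) - 1 = ((k : Nat) : Int) := by push_cast; ring
        rw [h]; exact (ih k (by omega)).2 f (by omega)
      have e4 : maleFuel f ((Fh k : Int)) = (Mh (Fh k) : Int) := by
        rcases Nat.lt_or_ge (Fh k) (k + 1) with h | h
        · exact (ih (Fh k) (by omega)).1 f (by omega) (by omega)
        · have hEq : Fh k = k + 1 := by omega
          rw [hEq]; exact hmale f (by omega)
      simp only [femaleFuel]
      rw [if_neg (by push_cast; omega), if_neg (by push_cast; omega), e3, e4]
      push_cast at hrk ⊢
      omega

theorem foldl_eq_FM (k : Nat) :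
    (PySem.List.pyRange 1 ((k : Int) + 1) 1).foldl femaleStep ([1], [0]) = FM k := by
  induction k with
  | zero => decide
  | succ k ih =>
    have h : ((k + 1 : Nat) : Int) + 1 = ((k : Int) + 1) + 1 := by push_cast; ring
    rw [h, PySem.List.pyRange_one_succ_right (by omega), List.foldl_append, ih]
    rfl

-- ===== VERDICT (by name: the statement is the Claim_ definition above) =====
theorem female_spec : Claim_equal_female := by
  intro n _ _
  show female n = female_alt n
  rcases Int.lt_or_le n 0 with hn | hn
  · have ht : n.toNat = 0 := by omega
    rw [female, ht, female_alt, if_pos hn]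
    simp only [femaleFuel]
    rw [if_pos hn]
  · obtain ⟨k, rfl⟩ : ∃ k : Nat, n = (k : Int) := ⟨n.toNat, (Int.toNat_of_nonneg hn).symm⟩
    have ht : ((k : Int)).toNat = k := Int.toNat_natCast k
    rw [female, ht, female_alt, if_neg (by omega)]
    simp only
    rw [foldl_eq_FM k]
    obtain ⟨hf, _, _, _⟩ := inv_all k
    rw [hf, PySem.List.pyGetD_natCast, PySem.List.getD_map_range _ _ _ _ (by omega)]
    exact (fuel_eq k).2 (2 * k + 2) (by omega)
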